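-- pv_equiv track=rewrite | github.com/rmullig2/AdventOfCode2023 | day18/day18_part2.py | grid_dimensions
-- ===== SOURCE A (Python) =====
-- def grid_dimensions(dig_plan):
--     min_row = max_row = min_col = max_col = row = col = 0
--     for step in dig_plan:
--         direction = step[0]
--         distance = step[1]
--         if direction == 'U':
--             row -= distance
--             if row < min_row: min_row = row
--         elif direction == 'D':
--             row += distance
--             if row > max_row: max_row = row
--         elif direction == 'L':
--             col -= distance
--             if col < min_col: min_col = col
--         elif direction == 'R':
--             col += distance
--             if col > max_col: max_col = col
--     rows = max_row - min_row + 1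
--     cols = max_col - min_col + 1
--     start_row = rows - max_row - 1
--     start_col = cols - max_col - 1
--     return rows, cols, [start_row, start_col]
-- ===== SOURCE B (Python) =====
-- def grid_dimensions(dig_plan):
--     delta = {'U': (-1, 0), 'D': (1, 0), 'L': (0, -1), 'R': (0, 1)}
--     row = col = 0
--     visited = [(0, 0)]
--     for step in dig_plan:
--         dr, dc = delta.get(step[0], (0, 0))
--         row += dr * step[1]
--         col += dc * step[1]
--         visited.append((row, col))
--     min_row = min(r for r, _ in visited)
--     max_row = max(r for r, _ in visited)
--     min_col = min(c for _, c in visited)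
--     max_col = max(c for _, c in visited)
--     rows = max_row - min_row + 1
--     cols = max_col - min_col + 1
--     return rows, cols, [rows - max_row - 1, cols - max_col - 1]
-- ===== Notes on version B (the rewrite author's own statement) =====
-- stated objective: alternative
-- what changed: B replaces A's inline min/max tracking inside a four-branch if/elif walk by a direction->delta dict walk that collects every visited point into a list seeded with the origin, then derives min/max row/col by reducing over that list after the walk.
-- outside the precondition, e.g. on grid_dimensions([('U', -3)]): A returns (1, 1, [0, 0]), B returns (4, 1, [0, 0])
import Mathlib
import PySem

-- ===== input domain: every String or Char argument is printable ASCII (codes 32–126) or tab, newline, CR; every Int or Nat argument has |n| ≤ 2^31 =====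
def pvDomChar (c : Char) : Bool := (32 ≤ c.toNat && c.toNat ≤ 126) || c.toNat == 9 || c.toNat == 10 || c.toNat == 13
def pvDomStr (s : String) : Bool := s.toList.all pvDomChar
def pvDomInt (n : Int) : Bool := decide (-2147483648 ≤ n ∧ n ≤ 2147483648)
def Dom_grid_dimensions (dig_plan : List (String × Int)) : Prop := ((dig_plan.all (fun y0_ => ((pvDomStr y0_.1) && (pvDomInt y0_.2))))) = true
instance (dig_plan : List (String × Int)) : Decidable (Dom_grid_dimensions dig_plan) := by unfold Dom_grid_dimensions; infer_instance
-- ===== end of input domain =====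

-- B collects all visited points and reduces with min/max afterwards instead of A's inline
-- min/max tracking; same cost, different decomposition (objective: alternative).

-- ===== PORT A =====
def gdStepA (st : Int × Int × Int × Int × Int × Int) (step : String × Int) :
    Int × Int × Int × Int × Int × Int :=
  let (mnr, mxr, mnc, mxc, row, col) := st
  let direction := step.1
  let distance := step.2
  if direction = "U" then
    let row := row - distance
    (if row < mnr then row else mnr, mxr, mnc, mxc, row, col)
  else if direction = "D" then
    let row := row + distance
    (mnr, if row > mxr then row else mxr, mnc, mxc, row, col)
  else if direction = "L" then
    let col := col - distance
    (mnr, mxr, if col < mnc then col else mnc, mxc, row, col)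
  else if direction = "R" then
    let col := col + distance
    (mnr, mxr, mnc, if col > mxc then col else mxc, row, col)
  else (mnr, mxr, mnc, mxc, row, col)

def grid_dimensions (dig_plan : List (String × Int)) : Int × Int × List Int :=
  let s := dig_plan.foldl gdStepA (0, 0, 0, 0, 0, 0)
  let (mnr, mxr, mnc, mxc, _, _) := s
  let rows := mxr - mnr + 1
  let cols := mxc - mnc + 1
  (rows, cols, [rows - mxr - 1, cols - mxc - 1])

-- ===== PORT B =====
def gdDelta : PySem.Dict String (Int × Int) :=
  PySem.Dict.ofList [("U", ((-1 : Int), (0 : Int))), ("D", (1, 0)), ("L", (0, -1)), ("R", (0, 1))]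

def gdStepB (acc : List (Int × Int) × Int × Int) (step : String × Int) :
    List (Int × Int) × Int × Int :=
  let (vs, row, col) := acc
  let (dr, dc) := PySem.Dict.getD gdDelta step.1 (0, 0)
  let row := row + dr * step.2
  let col := col + dc * step.2
  (vs ++ [(row, col)], row, col)

def grid_dimensions_alt (dig_plan : List (String × Int)) : Int × Int × List Int :=
  let visited := (dig_plan.foldl gdStepB ([(0, 0)], 0, 0)).1
  -- visited is never empty (it is seeded with (0,0)), so Python's min/max always return;
  -- .getD 0 is never reached.
  let min_row := (PySem.List.min? (visited.map Prod.fst) (fun x => x)).getD 0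
  let max_row := (PySem.List.max? (visited.map Prod.fst) (fun x => x)).getD 0
  let min_col := (PySem.List.min? (visited.map Prod.snd) (fun x => x)).getD 0
  let max_col := (PySem.List.max? (visited.map Prod.snd) (fun x => x)).getD 0
  let rows := max_row - min_row + 1
  let cols := max_col - min_col + 1
  (rows, cols, [rows - max_row - 1, cols - max_col - 1])

-- ===== PRECONDITION & SPEC =====
-- Pre_ restricts to the natural domain of a dig plan: every step whose direction actually
-- moves ('U','D','L','R') has a nonnegative distance.  On negative distances A's inline
-- min/max (updated only on the moving side) and B's min/max over all visited points are
-- two different readings of a malformed plan.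
def Pre_grid_dimensions (dig_plan : List (String × Int)) : Prop :=
  ∀ step ∈ dig_plan,
    (step.1 = "U" ∨ step.1 = "D" ∨ step.1 = "L" ∨ step.1 = "R") → 0 ≤ step.2
instance (dig_plan : List (String × Int)) : Decidable (Pre_grid_dimensions dig_plan) := by
  unfold Pre_grid_dimensions; infer_instance

def pvWitness_grid_dimensions : (List (String × Int)) :=
  [("R", 6), ("D", 5), ("L", 2), ("U", 3), ("X", 4)]

def Spec_grid_dimensions (dig_plan : List (String × Int)) (out : Int × Int × List Int) : Prop := out = grid_dimensions_alt dig_plan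
instance (dig_plan : List (String × Int)) (out : Int × Int × List Int) : Decidable (Spec_grid_dimensions dig_plan out) := by unfold Spec_grid_dimensions; infer_instance

-- ===== CLAIM (what is proved, stated in full; the proofs are below) =====
def Claim_equal_grid_dimensions : Prop := ∀ (dig_plan : List (String × Int)), Dom_grid_dimensions dig_plan → Pre_grid_dimensions dig_plan → Spec_grid_dimensions dig_plan (grid_dimensions dig_plan)

-- ===== LEMMAS AND PROOFS =====

lemma gdDelta_U : PySem.Dict.getD gdDelta "U" (0, 0) = ((-1 : Int), (0 : Int)) := by rfl
lemma gdDelta_D : PySem.Dict.getD gdDelta "D" (0, 0) = ((1 : Int), (0 : Int)) := by rfl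
lemma gdDelta_L : PySem.Dict.getD gdDelta "L" (0, 0) = ((0 : Int), (-1 : Int)) := by rfl
lemma gdDelta_R : PySem.Dict.getD gdDelta "R" (0, 0) = ((0 : Int), (1 : Int)) := by rfl

lemma gdDelta_other (s : String) (h1 : ¬ s = "U") (h2 : ¬ s = "D") (h3 : ¬ s = "L")
    (h4 : ¬ s = "R") : PySem.Dict.getD gdDelta s (0, 0) = ((0 : Int), (0 : Int)) := by
  have b1 : (("U" : String) == s) = false := beq_eq_false_iff_ne.mpr (fun h => h1 (Eq.symm h))
  have b2 : (("D" : String) == s) = false := beq_eq_false_iff_ne.mpr (fun h => h2 (Eq.symm h))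
  have b3 : (("L" : String) == s) = false := beq_eq_false_iff_ne.mpr (fun h => h3 (Eq.symm h))
  have b4 : (("R" : String) == s) = false := beq_eq_false_iff_ne.mpr (fun h => h4 (Eq.symm h))
  simp [gdDelta, PySem.Dict.getD, PySem.Dict.get?, PySem.Dict.ofList, PySem.Dict.update,
    PySem.Dict.insert, PySem.Dict.empty, PySem.Dict.contains, List.find?, b1, b2, b3, b4]

-- The list of positions visited after each step, starting from (r, c).
def gdTrace : List (String × Int) → Int → Int → List (Int × Int)
  | [], _, _ => []
  | s :: t, r, c =>
    let d := PySem.Dict.getD gdDelta s.1 (0, 0)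
    let r' := r + d.1 * s.2
    let c' := c + d.2 * s.2
    (r', c') :: gdTrace t r' c'

lemma gdFoldB_trace (l : List (String × Int)) (vs : List (Int × Int)) (r c : Int) :
    (l.foldl gdStepB (vs, r, c)).1 = vs ++ gdTrace l r c := by
  induction l generalizing vs r c with
  | nil => simp [gdTrace]
  | cons s t ih => simp [gdStepB, gdTrace, ih, List.append_assoc]

lemma gdMainA (l : List (String × Int)) (mnr mxr mnc mxc r c : Int)
    (hpre : Pre_grid_dimensions l)
    (h1 : mnr ≤ r) (h2 : r ≤ mxr) (h3 : mnc ≤ c) (h4 : c ≤ mxc) :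
    l.foldl gdStepA (mnr, mxr, mnc, mxc, r, c) =
      ((gdTrace l r c).foldl (fun a p => min a p.1) mnr,
       (gdTrace l r c).foldl (fun a p => max a p.1) mxr,
       (gdTrace l r c).foldl (fun a p => min a p.2) mnc,
       (gdTrace l r c).foldl (fun a p => max a p.2) mxc,
       (l.foldl gdStepA (mnr, mxr, mnc, mxc, r, c)).2.2.2.2) := by
  induction l generalizing mnr mxr mnc mxc r c with
  | nil => simp [gdTrace]
  | cons s t ih =>
    have hs := hpre s (by simp)
    have hpre' : Pre_grid_dimensions t := fun x hx => hpre x (by simp [hx])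
    by_cases hU : s.1 = "U"
    · have hd : 0 ≤ s.2 := hs (Or.inl hU)
      simp only [List.foldl_cons, gdTrace, gdStepA, hU, gdDelta_U, reduceIte]
      have e0 : r + -1 * s.2 = r - s.2 := by ring
      have e0' : c + 0 * s.2 = c := by ring
      rw [e0, e0']
      have e1 : (if r - s.2 < mnr then r - s.2 else mnr) = min mnr (r - s.2) := by
        split_ifs <;> omega
      have e2 : max mxr (r - s.2) = mxr := by omega
      have e3 : min mnc c = mnc := by omega
      have e4 : max mxc c = mxc := by omega
      rw [e1, e2, e3, e4]
      exact ih _ _ _ _ _ _ hpre' (by omega) (by omega) h3 h4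
    · by_cases hD : s.1 = "D"
      · have hd : 0 ≤ s.2 := hs (Or.inr (Or.inl hD))
        simp only [List.foldl_cons, gdTrace, gdStepA, hD, gdDelta_D, reduceIte]
        have e0 : r + 1 * s.2 = r + s.2 := by ring
        have e0' : c + 0 * s.2 = c := by ring
        rw [e0, e0']
        have e1 : min mnr (r + s.2) = mnr := by omega
        have e2 : (if r + s.2 > mxr then r + s.2 else mxr) = max mxr (r + s.2) := by
          split_ifs <;> omega
        have e3 : min mnc c = mnc := by omega
        have e4 : max mxc c = mxc := by omega
        rw [e1, e2, e3, e4]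
        exact ih _ _ _ _ _ _ hpre' (by omega) (by omega) h3 h4
      · by_cases hL : s.1 = "L"
        · have hd : 0 ≤ s.2 := hs (Or.inr (Or.inr (Or.inl hL)))
          simp only [List.foldl_cons, gdTrace, gdStepA, hL, gdDelta_L, reduceIte]
          have e0 : r + 0 * s.2 = r := by ring
          have e0' : c + -1 * s.2 = c - s.2 := by ring
          rw [e0, e0']
          have e1 : min mnr r = mnr := by omega
          have e2 : max mxr r = mxr := by omega
          have e3 : (if c - s.2 < mnc then c - s.2 else mnc) = min mnc (c - s.2) := by
            split_ifs <;> omega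
          have e4 : max mxc (c - s.2) = mxc := by omega
          rw [e1, e2, e3, e4]
          exact ih _ _ _ _ _ _ hpre' h1 h2 (by omega) (by omega)
        · by_cases hR : s.1 = "R"
          · have hd : 0 ≤ s.2 := hs (Or.inr (Or.inr (Or.inr hR)))
            simp only [List.foldl_cons, gdTrace, gdStepA, hR, gdDelta_R,
              reduceIte]
            have e0 : r + 0 * s.2 = r := by ring
            have e0' : c + 1 * s.2 = c + s.2 := by ring
            rw [e0, e0']
            have e1 : min mnr r = mnr := by omega
            have e2 : max mxr r = mxr := by omega
            have e3 : min mnc (c + s.2) = mnc := by omega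
            have e4 : (if c + s.2 > mxc then c + s.2 else mxc) = max mxc (c + s.2) := by
              split_ifs <;> omega
            rw [e1, e2, e3, e4]
            exact ih _ _ _ _ _ _ hpre' h1 h2 (by omega) (by omega)
          · simp only [List.foldl_cons, gdTrace, gdStepA, if_neg hU, if_neg hD, if_neg hL,
              if_neg hR, gdDelta_other s.1 hU hD hL hR]
            have e0 : r + 0 * s.2 = r := by ring
            have e0' : c + 0 * s.2 = c := by ring
            rw [e0, e0']
            have e1 : min mnr r = mnr := by omega
            have e2 : max mxr r = mxr := by omega
            have e3 : min mnc c = mnc := by omega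
            have e4 : max mxc c = mxc := by omega
            rw [e1, e2, e3, e4]
            exact ih _ _ _ _ _ _ hpre' h1 h2 h3 h4

-- ===== VERDICT (by name: the statement is the Claim_ definition above) =====
theorem grid_dimensions_spec : Claim_equal_grid_dimensions := by
  intro dig_plan _hdom hpre
  unfold Spec_grid_dimensions grid_dimensions grid_dimensions_alt
  rw [gdFoldB_trace]
  rw [gdMainA dig_plan 0 0 0 0 0 0 hpre le_rfl le_rfl le_rfl le_rfl]
  simp [PySem.List.min?_id_cons, PySem.List.max?_id_cons, List.foldl_map]
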